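-- pv_equiv track=rewrite | github.com/AlexSafatli/Pylogeny | pylogeny/newick.py | getLeafName
-- ===== SOURCE A (Python) =====
-- def getLeafName(newick,i):
--
--     ''' Given the position of a leaf, find its complete name. '''
--
--     runningstr = ''
--     while (i < len(newick)):
--         if newick[i] in [',',':',';',')'] \
--            or i == len(newick):
--             return (i-1,runningstr)
--         runningstr += newick[i]
--         i += 1
--     return (i-1,runningstr)
-- ===== SOURCE B (Python) =====
-- def getLeafName(newick, i):
--
--     ''' Given the position of a leaf, find its complete name. '''
--
--     s = newick[i:]
--     cuts = [k for k in map(s.find, ',:;)') if k != -1]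
--     n = min(cuts, default=len(s))
--     return (i + n - 1, s[:n])
-- ===== Notes on version B (the rewrite author's own statement) =====
-- stated objective: faster
-- what changed: Replaces the char-by-char accumulation loop by slicing the tail, locating each of the four delimiters with str.find, and cutting the slice at the minimum hit (default = whole tail); the scan runs in C-level str.find/slicing instead of a per-character Python loop.
-- outside the precondition, e.g. on getLeafName('ab', -2): A returns (1, 'abab'), B returns (-1, 'ab'); on getLeafName('ab', -5): A raises IndexError, B returns (-4, 'ab')
import Mathlib
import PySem

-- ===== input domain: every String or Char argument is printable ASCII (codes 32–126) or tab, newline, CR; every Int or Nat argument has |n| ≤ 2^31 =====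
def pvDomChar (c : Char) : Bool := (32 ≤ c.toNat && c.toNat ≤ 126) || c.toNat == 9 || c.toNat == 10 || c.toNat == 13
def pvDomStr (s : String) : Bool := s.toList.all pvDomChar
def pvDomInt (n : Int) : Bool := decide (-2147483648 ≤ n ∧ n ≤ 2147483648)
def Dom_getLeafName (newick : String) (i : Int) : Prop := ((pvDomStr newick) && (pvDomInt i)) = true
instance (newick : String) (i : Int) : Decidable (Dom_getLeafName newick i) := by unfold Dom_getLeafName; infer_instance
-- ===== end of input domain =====

-- B replaces A's char-by-char accumulation loop by slicing the tail and cutting it at the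
-- minimum str.find hit of the four delimiters (measured faster: C-level find/slicing).

-- ===== PORT A =====
-- A's while-loop: i advances towards len(newick); accumulates non-delimiter chars.
def getLeafNameGo (cs : List Char) (i : Int) (acc : List Char) : Int × String :=
  if _h : i < (cs.length : Int) then
    match PySem.List.pyGet? cs i with
    | none => (i - 1, String.ofList acc)  -- Python IndexError (i below -len); outside Pre_
    | some c =>
      if c = ',' ∨ c = ':' ∨ c = ';' ∨ c = ')' then (i - 1, String.ofList acc)
      else getLeafNameGo cs (i + 1) (acc ++ [c])
  else (i - 1, String.ofList acc)
termination_by ((cs.length : Int) - i).toNat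
decreasing_by omega

def getLeafName (newick : String) (i : Int) : Int × String :=
  getLeafNameGo newick.toList i []

-- ===== PORT B =====
def getLeafName_alt (newick : String) (i : Int) : Int × String :=
  let s := PySem.List.slice newick.toList (some i) none
  let cuts := ([',', ':', ';', ')'].map (fun c => PySem.Chars.find s [c])).filter (fun k => k ≠ -1)
  let n := (PySem.List.min? cuts (fun k => k)).getD (s.length : Int)
  (i + n - 1, String.ofList (PySem.List.slice s none (some n)))

-- ===== PRECONDITION & SPEC =====
-- Pre_ excludes negative positions, which are outside the function's natural domain ('the
-- position of a leaf' is an index into the string): there A raises IndexError for i < -len,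
-- and otherwise reads from a wrapped-around start, which B does not reproduce in general.
def Pre_getLeafName (newick : String) (i : Int) : Prop := 0 ≤ i
instance (newick : String) (i : Int) : Decidable (Pre_getLeafName newick i) := by unfold Pre_getLeafName; infer_instance
def pvWitness_getLeafName : String × Int := ("(A,B);", 1)

def Spec_getLeafName (newick : String) (i : Int) (out : Int × String) : Prop := out = getLeafName_alt newick i
instance (newick : String) (i : Int) (out : Int × String) : Decidable (Spec_getLeafName newick i out) := by unfold Spec_getLeafName; infer_instance

-- ===== CLAIM (what is proved, stated in full; the proofs are below) =====
def Claim_equal_getLeafName : Prop := ∀ (newick : String) (i : Int), Dom_getLeafName newick i → Pre_getLeafName newick i → Spec_getLeafName newick i (getLeafName newick i)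

-- ===== LEMMAS AND PROOFS =====

-- the non-delimiter ("keep scanning") predicate shared by the reasoning about both ports
def pvKeep (c : Char) : Bool := !(c = ',' ∨ c = ':' ∨ c = ';' ∨ c = ')')

theorem pvKeep_false_iff (c : Char) : pvKeep c = false ↔ c ∈ [',', ':', ';', ')'] := by
  simp [pvKeep]; tauto

-- a single-character pattern is a prefix iff it is the head
theorem pvPrefix_single (c : Char) (l : List Char) : [c] <+: l ↔ l[0]? = some c := by
  cases l with
  | nil => simp
  | cons a t => simp [List.cons_prefix_cons, eq_comm]

-- a single-character pattern is an infix iff the character occurs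
theorem pvInfix_single (c : Char) (l : List Char) : [c] <:+: l ↔ c ∈ l := by
  constructor
  · intro h; exact (List.singleton_sublist).1 h.sublist
  · intro h
    obtain ⟨t, u, rfl⟩ := List.append_of_mem h
    exact ⟨t, u, by simp⟩

-- characterisation of takeWhile's length
theorem pvTw_true (p : Char → Bool) (s : List Char) (j : Nat)
    (h1 : j < (s.takeWhile p).length) (h2 : j < s.length) : p s[j] = true := by
  induction s generalizing j with
  | nil => simp at h2
  | cons a t ih =>
    by_cases hp : p a
    · cases j with
      | zero => simpa using hp
      | succ k =>
        simp only [List.takeWhile_cons, hp, if_true, List.length_cons, Nat.add_lt_add_iff_right] at h1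
        simpa using ih k h1 (by simpa using h2)
    · simp [hp] at h1

theorem pvTw_stop (p : Char → Bool) (s : List Char)
    (h : (s.takeWhile p).length < s.length) : p (s[(s.takeWhile p).length]'h) = false := by
  induction s with
  | nil => simp at h
  | cons a t ih =>
    by_cases hp : p a
    · have h' : (t.takeWhile p).length < t.length := by
        simpa [List.takeWhile_cons, hp] using h
      simpa [List.takeWhile_cons, hp] using ih h'
    · simp [hp]

theorem pvTw_all (p : Char → Bool) (s : List Char) (h : ∀ x ∈ s, p x = true) :
    s.takeWhile p = s := by
  induction s with
  | nil => rfl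
  | cons a t ih =>
    simp [h a (by simp), ih (fun x hx => h x (by simp [hx]))]

-- A's loop computes takeWhile of the tail, shifted by i
theorem pvA_loop (cs : List Char) (i : Int) (acc : List Char) (hi : 0 ≤ i) :
    getLeafNameGo cs i acc =
      (i + (((cs.drop i.toNat).takeWhile pvKeep).length : Int) - 1,
       String.ofList (acc ++ (cs.drop i.toNat).takeWhile pvKeep)) := by
  rw [getLeafNameGo]
  by_cases h : i < (cs.length : Int)
  · have hlt : i.toNat < cs.length := by omega
    have hget : PySem.List.pyGet? cs i = some cs[i.toNat] :=
      PySem.List.pyGet?_eq_some_getElem cs hi h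
    have hdrop : cs.drop i.toNat = cs[i.toNat] :: cs.drop (i.toNat + 1) :=
      List.drop_eq_getElem_cons hlt
    simp only [dif_pos h, hget]
    by_cases hd : cs[i.toNat] = ',' ∨ cs[i.toNat] = ':' ∨ cs[i.toNat] = ';' ∨ cs[i.toNat] = ')'
    · have hk : pvKeep cs[i.toNat] = false := by
        simp [pvKeep]; tauto
      rw [if_pos hd, hdrop, List.takeWhile_cons_of_neg (by simp [hk])]
      simp
    · have hk : pvKeep cs[i.toNat] = true := by
        simp [pvKeep]; tauto
      rw [if_neg hd, pvA_loop cs (i + 1) (acc ++ [cs[i.toNat]]) (by omega), hdrop]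
      have ht : (i + 1).toNat = i.toNat + 1 := by omega
      rw [ht]
      rw [List.takeWhile_cons_of_pos hk]
      refine congrArg₂ Prod.mk ?_ ?_
      · simp only [List.length_cons]; push_cast; ring
      · simp
  · have hnil : cs.drop i.toNat = [] := List.drop_eq_nil_of_le (by omega)
    rw [dif_neg h, hnil]
    simp
termination_by ((cs.length : Int) - i).toNat
decreasing_by omega

-- B's cut index is takeWhile's length
theorem pvB_cut (s : List Char) :
    ((PySem.List.min?
        ((([',', ':', ';', ')'].map (fun c => PySem.Chars.find s [c])).filter (fun k => k ≠ -1)))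
        (fun k => k)).getD (s.length : Int))
      = ((s.takeWhile pvKeep).length : Int) := by
  set D : List Char := [',', ':', ';', ')'] with hD
  set cuts : List Int := (D.map (fun c => PySem.Chars.find s [c])).filter (fun k => k ≠ -1) with hcuts
  have mem_cuts : ∀ k, k ∈ cuts ↔ (∃ c ∈ D, PySem.Chars.find s [c] = k) ∧ k ≠ -1 := by
    intro k; simp [hcuts, and_comm]
  cases hmin : PySem.List.min? cuts (fun k => k) with
  | none =>
    have hnil : cuts = [] := (PySem.List.min?_eq_none_iff _ _).1 hmin
    have hall : ∀ x ∈ s, pvKeep x = true := by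
      intro x hx
      by_contra hfx
      have hxD : x ∈ D := (pvKeep_false_iff x).1 (by simpa using hfx)
      have hne : PySem.Chars.find s [x] ≠ -1 := by
        rw [PySem.Chars.find_ne_neg_one_iff]
        exact (pvInfix_single x s).2 hx
      have : PySem.Chars.find s [x] ∈ cuts := (mem_cuts _).2 ⟨⟨x, hxD, rfl⟩, hne⟩
      simp [hnil] at this
    simp [pvTw_all _ _ hall]
  | some m =>
    obtain ⟨⟨c, hcD, hFc⟩, hm1⟩ := (mem_cuts m).1 (PySem.List.min?_mem hmin)
    have hm0 : 0 ≤ m := by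
      have := PySem.Chars.neg_one_le_find s [c]
      omega
    obtain ⟨hpre, hmin_occ⟩ := PySem.Chars.find_spec (s := s) (sub := [c]) (by rw [hFc]; exact hm0)
    rw [hFc] at hpre hmin_occ
    have hsm : s[m.toNat]? = some c := by
      have := (pvPrefix_single c (s.drop m.toNat)).1 hpre
      simpa [List.getElem?_drop] using this
    have hmlt : m.toNat < s.length := by
      by_contra hge
      simp [List.getElem?_eq_none (by omega : s.length ≤ m.toNat)] at hsm
    set T := (s.takeWhile pvKeep).length with hT
    have hTle : T ≤ s.length := (List.takeWhile_prefix pvKeep).length_le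
    have h1 : ¬ m.toNat < T := by
      intro hlt
      have := pvTw_true pvKeep s m.toNat hlt hmlt
      have hc : s[m.toNat] = c := by
        have := hsm; rw [List.getElem?_eq_getElem hmlt] at this; exact Option.some.inj this
      rw [hc] at this
      have : pvKeep c = false := (pvKeep_false_iff c).2 hcD
      simp_all
    have h2 : ¬ T < m.toNat := by
      intro hlt
      have hTlt : T < s.length := by omega
      have hstop : pvKeep (s[T]'hTlt) = false := pvTw_stop pvKeep s hTlt
      set c' := s[T]'hTlt with hc'
      have hc'D : c' ∈ D := (pvKeep_false_iff c').1 hstop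
      have hocc : [c'] <+: s.drop T := by
        rw [pvPrefix_single]
        simp [List.getElem?_drop, List.getElem?_eq_getElem hTlt, hc']
      have hne : PySem.Chars.find s [c'] ≠ -1 := by
        rw [PySem.Chars.find_ne_neg_one_iff]
        exact (pvInfix_single c' s).2 (by rw [hc']; exact List.getElem_mem hTlt)
      have hmem : PySem.Chars.find s [c'] ∈ cuts := (mem_cuts _).2 ⟨⟨c', hc'D, rfl⟩, hne⟩
      have hge : m ≤ PySem.Chars.find s [c'] := PySem.List.min?_isMin hmin _ hmem
      have h0' : 0 ≤ PySem.Chars.find s [c'] := by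
        have := PySem.Chars.neg_one_le_find s [c']
        omega
      obtain ⟨_, hmin'⟩ := PySem.Chars.find_spec (s := s) (sub := [c']) h0'
      have hle : (PySem.Chars.find s [c']).toNat ≤ T := by
        by_contra hgt
        exact hmin' T (by omega) hocc
      omega
    have : m = (T : Int) := by omega
    simp [this]

-- ===== VERDICT (by name: the statement is the Claim_ definition above) =====
theorem getLeafName_spec : Claim_equal_getLeafName := by
  intro newick i _hdom hpre
  unfold Spec_getLeafName getLeafName getLeafName_alt
  have hpre' : (0:Int) ≤ i := hpre
  simp only []
  rw [pvB_cut, pvA_loop _ _ _ hpre', PySem.List.slice_from _ hpre',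
      PySem.List.slice_to _ (by positivity)]
  simp only [Int.toNat_natCast, List.nil_append]
  congr 1
  exact congrArg String.ofList (List.prefix_iff_eq_take.1 (List.takeWhile_prefix pvKeep))
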